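/- GENERATED by tools/from_farm_form.py from prooffarm-gif/accepted/DGifOpen.5/Lemmas.lean (a worked proof of the farm's unit `DGifOpen.5`,
   accepted by the verdict) — do not edit. -/
import Gif.Spec.Units.DGifOpen_5
import Gif.Spec.AllSegs

/-!
  Lemmas for the unit `DGifOpen.5` (dgif_lib.c:227-239; 0x1087da … 0x108816 and the error exit 0x1088cb … 0x1088fa).
-/

open X86 X86.User Asan ProgX.Base ProgX.Base.Spec Gif.Spec

set_option maxRecDepth 4000
set_option maxHeartbeats 4000000

namespace Gif.Spec.DGifOpen_5

/-- **`Env` at the entry of a callee of DGifOpen's body** (`Env.at_call` of Gif/Spec/FrameCarry.lean for a function that has NO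
`Env` at its entry: DGifOpen is entered without a forest, so the static facts come from its `HeapPre` and `Ctx`, and the present
heap `Hc` is at the place of the entry's). `hinv` / `hok` are the body's invariants at a memory `mem`; the callee's entry state
`s` differs from `mem` by stack stores below `top`. -/
theorem seg5_env_at_call {H Hc : Heap} {rest : List Obj} {frames : List (Nat × FrameLayout)} {F : Forest} {R : Rd} {e s : State}
    {base top lo : Nat} {Fl : FrameLayout} {mem : Mem} (hheap : HeapPre H rest frames e) (hctx : Ctx rest frames R)
    (hreg : SameRegion H Hc)
    (hinv : HeapInv Hc rest ((base, Fl) :: frames) top mem) (hok : GifOK Hc F R mem)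
    (hs : Mem.SameExcept [⟨lo, top⟩] mem s.mem) (hlo : 0x700000 ≤ lo) (htop : top ≤ (e.reg .rsp).toNat + 8)
    (hsp : (s.reg .rsp).toNat + 8 ≤ top) (h8 : (s.reg .rsp).toNat % 8 = 0) (hlo' : 0x700000 ≤ (s.reg .rsp).toNat + 8) :
    Env Hc rest ((base, Fl) :: frames) F R s := by
  have hcur := hctx.cursor_range hheap.inv.shadow
  have hhi := hinv.shadow.stack.hi
  have hoff := hinv.heap.offStack
  have hroom := hinv.heap.room
  have hun : ShadowUntouched mem s.mem := by
    apply hs.eqOn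
    intro w hw
    have e := List.mem_singleton.mp hw
    rw [e]
    simp only
    omega
  have hinv' : HeapInv Hc rest ((base, Fl) :: frames) ((s.reg .rsp).toNat + 8) s.mem := by
    refine (hinv.sameExcept hun hs ?_).lower hsp (by omega) hlo'
    intro w hw
    have e := List.mem_singleton.mp hw
    rw [e]
    left
    simp only
    omega
  refine ⟨⟨hinv', hreg.1.trans hheap.base, hreg.2.trans hheap.limit, hheap.text, hheap.offText⟩, hctx.push base Fl, ?_⟩
  apply hok.sameExcept hinv.heap ⟨hcur.1, hcur.2.1⟩ hs
  intro w hw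
  have e := List.mem_singleton.mp hw
  rw [e]
  apply Loose.stack hinv.heap
  · simp only
    omega
  · simp only
    omega
  · simp only
    omega

/-- **At 1087E2H (ret15), `DGifGetScreenDesc(gif)` has returned**: `Core`; `r13 = Error`, `rbx = gif`, `rbp = pv` (callee-saved);
the present heap `Hn` with its invariant, the forest `Fn` (gif, pv and possibly the screen's colour map) with the state
invariant; `eax` is GIF_OK or GIF_ERROR, and GIF_ERROR means that no colour map is owned. -/
structure seg5_AtRet15 (H : Heap) (rest : List Obj) (frames : List (Nat × FrameLayout)) (R : Rd) (Hn : Heap) (Fn : Forest)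
    (gif pv : Nat) (u₀ e : State) (ret : Word) (v : State) : Prop where
  core : DGifOpen.Core Gif.L.DGifOpen.ret15 H rest frames R u₀ e ret v
  r13 : v.reg .r13 = e.reg .rdx
  rbx : (v.reg .rbx).toNat = gif
  rbp : (v.reg .rbp).toNat = pv
  region : SameRegion H Hn
  inv : HeapInv Hn rest (DGifOpen.framesIn frames e) ((e.reg .rsp).toNat - 120) v.mem
  ok : GifOK Hn Fn R v.mem
  fgif : Fn.gif = gif
  fpv : Fn.pv = pv
  ficm : Fn.icm = none
  fsaved : Fn.saved = none
  fpend : Fn.pend = none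
  bool : IsBool v
  err : (v.reg .rax).toNat = 0 → Fn.scm = none

/-- **1087DAH … the call of DGifGetScreenDesc … 1087E2H (ret15)** (dgif_lib.c:227). -/
theorem seg5_call (Lay : Layout) (hLay : Lay.hi = 0x1000000) (μ : Microarch) (hμ : UserX.MicroOK μ) (u₀ : State)
    (hcode : HasCodeNat Lay u₀ Gif.L.DGifOpen.entry Gif.Code.code_DGifOpen.nat Gif.L.DGifOpen.size)
    (H : Heap) (rest : List Obj) (frames : List (Nat × FrameLayout)) (R : Rd) (Hc : Heap) (gif pv : Nat) (e : State) (ret : Word)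
    (h_desc : Calls Lay μ ProgX.Base.WayInv (ProgX.Base.conv u₀) Gif.L.DGifGetScreenDesc.entry
      (Gif.Spec.DGifGetScreenDesc.spec Hc rest (DGifOpen.framesIn frames e) (DGifOpen.fresh gif pv) R))
    (v : State) (hat : DGifOpen.Opened Gif.L.DGifOpen.at_1087da H rest frames R Hc gif pv u₀ e ret v) :
    ReachVia Lay μ ProgX.Base.WayInv v
      (fun w => ∃ Hn Fn, seg5_AtRet15 H rest frames R Hn Fn gif pv u₀ e ret w) := by
  obtain ⟨hcore, c_r13, hrbx, hrbp, hregion, hinv, hok⟩ := hat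
  have he := hcore.entry
  v_entry he
  obtain ⟨hheap, hctx, hcursor0, hconsts0, hrdi, hrsi, herr⟩ := hcore.pre
  have w_rip := hcore.rip
  have c_rsp : v.reg .rsp = e.reg .rsp - 120 := hcore.rsp
  have w_kept : RegsKept [.rsp] v v := RegsKept.refl _ _
  have w_eq : Mem.EqOn ProgX.Base.L.textLo ProgX.Base.L.textHi u₀.mem v.mem := ProgX.Base.conv_code_eqOn hcore.code
  have hdf := (show abiInv _ from hcore.abi).1
  have hmx := (show abiInv _ from hcore.abi).2
  have hsse := ProgX.Base.sseOK_of_abiInv hcore.abi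
  -- the slots and the footprint that `Core` at the exit states again
  have k_r15 : v.mem.readLE (e.reg .rsp - 8) 8 = (e.reg .r15).toNat := hcore.slot_r15
  have k_r14 : v.mem.readLE (e.reg .rsp - 16) 8 = (e.reg .r14).toNat := hcore.slot_r14
  have k_r13 : v.mem.readLE (e.reg .rsp - 24) 8 = (e.reg .r13).toNat := hcore.slot_r13
  have k_r12 : v.mem.readLE (e.reg .rsp - 32) 8 = (e.reg .r12).toNat := hcore.slot_r12
  have k_rbp : v.mem.readLE (e.reg .rsp - 40) 8 = (e.reg .rbp).toNat := hcore.slot_rbp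
  have k_rbx : v.mem.readLE (e.reg .rsp - 48) 8 = (e.reg .rbx).toNat := hcore.slot_rbx
  have k_ra : UInt64.ofNat (v.mem.readLE (e.reg .rsp) 8) = ret := hcore.slot_ra
  have hsame : Mem.SameExcept
    [⟨(e.reg .rsp).toNat - 528, (e.reg .rsp).toNat⟩,
     shadowSpan ((e.reg .rsp).toNat - 120) ((e.reg .rsp).toNat - 56),
     ⟨0x800000, 0x1000020⟩,
     ⟨(e.reg .rdx).toNat, (e.reg .rdx).toNat + 4⟩,
     ⟨R.cur, R.cur + 8⟩] e.mem v.mem := hcore.same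
  -- where the cursor is, as numbers
  have hcur := hctx.cursor_range hheap.inv.shadow
  have hbase := hheap.base
  u_walk hcode [hμ.vendor] until [Gif.L.DGifOpen.ret15] span [ProgX.Base.L.textLo, ProgX.Base.L.textHi] side (v_side)
  case call_inv =>
    v_inv
  case pre_1087dd =>
    -- DGIFGETSCREENDESC'S PRECONDITION: the environment for the frame list with the own frame in front (only the return
    -- address was pushed since `v`), `rdi = gif`, no screen colour map yet
    have hs : Mem.SameExcept [⟨(e.reg .rsp).toNat - 528, (e.reg .rsp).toNat - 120⟩] v.mem s_1087dd.mem := by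
      rw [w_mem]
      u_same
    have henv' : Env Hc rest (DGifOpen.framesIn frames e) (DGifOpen.fresh gif pv) R s_1087dd := by
      refine seg5_env_at_call hheap hctx hregion hinv hok hs (by omega) (by omega) ?_ ?_ ?_
      · rw [w_rsp]
        u_omega
      · rw [w_rsp]
        u_omega
      · rw [w_rsp]
        u_omega
    refine ⟨henv', ?_, rfl⟩
    rw [w_rdi]
    exact hrbx
  -- 0x1087e2 (ret15): DGIFGETSCREENDESC HAS RETURNED. Its post: a heap `Hn`, a forest `Fn`
  obtain ⟨Hn, Fn, hback, hsb, hbool, herr0⟩ := w_post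
  obtain ⟨hfgif, hfpv, hficm, hfsaved, hfpend⟩ := hsb
  -- the reader at the callee's entry is where it was at `v`: only the return address was pushed
  have hs0 : Mem.SameExcept [⟨(e.reg .rsp).toNat - 528, (e.reg .rsp).toNat - 120⟩] v.mem s_1087dd.mem := by
    rw [w_mem_1087dd]
    u_same
  have hrem0 : rem R s_1087dd.mem = rem R v.mem := by
    apply rem_sameExcept hs0 (by omega)
    intro w hw
    have e := List.mem_singleton.mp hw
    rw [e]
    simp only
    omega
  have e_top : (s_1087dd.reg .rsp).toNat + 8 = (e.reg .rsp).toNat - 120 := by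
    rw [w_rsp_1087dd]
    u_omega
  -- the callee's footprint in terms of `v`
  v_after_call w_rsp_1087dd w_mem_1087dd
  -- THE SLOTS AND THE RETURN ADDRESS, over the pushed return address and through the callee's footprint
  have hp15 : s_1087dd.mem.readLE (e.reg .rsp - 8) 8 = (e.reg .r15).toNat := by
    rw [w_mem_1087dd]
    u_frame k_r15
  rw [w_mem_1087dd] at hp15
  have hs15 : s_1087ddr.mem.readLE (e.reg .rsp - 8) 8 = (e.reg .r15).toNat := by u_frame hp15
  have hp14 : s_1087dd.mem.readLE (e.reg .rsp - 16) 8 = (e.reg .r14).toNat := by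
    rw [w_mem_1087dd]
    u_frame k_r14
  rw [w_mem_1087dd] at hp14
  have hs14 : s_1087ddr.mem.readLE (e.reg .rsp - 16) 8 = (e.reg .r14).toNat := by u_frame hp14
  have hp13 : s_1087dd.mem.readLE (e.reg .rsp - 24) 8 = (e.reg .r13).toNat := by
    rw [w_mem_1087dd]
    u_frame k_r13
  rw [w_mem_1087dd] at hp13
  have hs13 : s_1087ddr.mem.readLE (e.reg .rsp - 24) 8 = (e.reg .r13).toNat := by u_frame hp13
  have hp12 : s_1087dd.mem.readLE (e.reg .rsp - 32) 8 = (e.reg .r12).toNat := by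
    rw [w_mem_1087dd]
    u_frame k_r12
  rw [w_mem_1087dd] at hp12
  have hs12 : s_1087ddr.mem.readLE (e.reg .rsp - 32) 8 = (e.reg .r12).toNat := by u_frame hp12
  have hpbp : s_1087dd.mem.readLE (e.reg .rsp - 40) 8 = (e.reg .rbp).toNat := by
    rw [w_mem_1087dd]
    u_frame k_rbp
  rw [w_mem_1087dd] at hpbp
  have hsbp : s_1087ddr.mem.readLE (e.reg .rsp - 40) 8 = (e.reg .rbp).toNat := by u_frame hpbp
  have hpbx : s_1087dd.mem.readLE (e.reg .rsp - 48) 8 = (e.reg .rbx).toNat := by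
    rw [w_mem_1087dd]
    u_frame k_rbx
  rw [w_mem_1087dd] at hpbx
  have hsbx : s_1087ddr.mem.readLE (e.reg .rsp - 48) 8 = (e.reg .rbx).toNat := by u_frame hpbx
  have hpra : UInt64.ofNat (s_1087dd.mem.readLE (e.reg .rsp) 8) = ret := by
    rw [w_mem_1087dd]
    u_frame k_ra
  rw [w_mem_1087dd] at hpra
  have hsra : UInt64.ofNat (s_1087ddr.mem.readLE (e.reg .rsp) 8) = ret := by u_frame hpra
  -- the footprint since the entry: the callee's windows lie inside the function's
  have hsame1 : Mem.SameExcept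
    [⟨(e.reg .rsp).toNat - 528, (e.reg .rsp).toNat⟩,
     shadowSpan ((e.reg .rsp).toNat - 120) ((e.reg .rsp).toNat - 56),
     ⟨0x800000, 0x1000020⟩,
     ⟨(e.reg .rdx).toNat, (e.reg .rdx).toNat + 4⟩,
     ⟨R.cur, R.cur + 8⟩] e.mem s_1087ddr.mem := by u_same
  -- the heap's invariant comes back with the clean stack at the callee's `rsp + 8` = the body's `rsp`
  have hinv1 : HeapInv Hn rest (DGifOpen.framesIn frames e) ((e.reg .rsp).toNat - 120) s_1087ddr.mem := by
    rw [← e_top]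
    exact hback.inv
  refine ReachVia.done ⟨Hn, Fn, ?_⟩
  exact {
    core := {
      entry := hcore.entry
      pre := hcore.pre
      rip := w_rip
      rsp := w_rsp
      r12 := (w_kept.get .r12 rfl).trans hcore.r12
      slot_r15 := hs15
      slot_r14 := hs14
      slot_r13 := hs13
      slot_r12 := hs12
      slot_rbp := hsbp
      slot_rbx := hsbx
      slot_ra := hsra
      rem := by
        refine Nat.le_trans hback.rem ?_
        rw [hrem0]
        exact hcore.rem
      same := hsame1
      code := w_code
      abi := w_inv
    }
    r13 := (w_kept.get .r13 rfl).trans c_r13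
    rbx := by
      rw [w_kept.get .rbx rfl]
      exact hrbx
    rbp := by
      rw [w_kept.get .rbp rfl]
      exact hrbp
    region := hregion.trans hback.region
    inv := hinv1
    ok := hback.ok
    fgif := hfgif
    fpv := hfpv
    ficm := hficm
    fsaved := hfsaved
    fpend := hfpend
    bool := hbool
    err := herr0
  }

/-- **A store into the body of pv** (`[4, 64)`: FileHandle, the LZW scalars; `[80, 24936)`: Write, the tables, `gif89`) keeps the
heap's invariant, the state invariant and the reader's measure (`store_gif` of Gif/Spec/FrameCarry.lean, for the private object). -/
theorem seg5_store_pv {H : Heap} {rest : List Obj} {frames : List (Nat × FrameLayout)} {F : Forest} {R : Rd} {top : Nat}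
    {mem : Mem} (hinv : HeapInv H rest frames top mem) (hok : GifOK H F R mem)
    (hcur : 0x700000 ≤ R.cur ∧ R.cur + 16 ≤ 0x800000) (hbase : H.base = 0x800000) (a : Word) (k val : Nat)
    (hw : (F.pv + 4 ≤ a.toNat ∧ a.toNat + k ≤ F.pv + 64) ∨ (F.pv + 80 ≤ a.toNat ∧ a.toNat + k ≤ F.pv + 24936)) :
    HeapInv H rest frames top (mem.writeLE a k val) ∧ GifOK H F R (mem.writeLE a k val) ∧
      rem R (mem.writeLE a k val) = rem R mem := by
  have hpin := hok.owns.inside hinv.heap (o := (F.pv, 24936)) (List.mem_cons_of_mem _ List.mem_cons_self)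
  simp only at hpin
  have hs : Mem.SameExcept [⟨a.toNat, a.toNat + k⟩] mem (mem.writeLE a k val) :=
    Mem.SameExcept.writeLE _ mem a k val (by omega) ⟨_, List.mem_cons_self, Nat.le_refl _, Nat.le_refl _⟩
  refine ⟨hinv.writeLE_live hok.pv_live a k val (by omega) (by omega), ?_, ?_⟩
  · apply hok.sameExcept hinv.heap hcur hs
    intro w hw'
    have e := List.mem_singleton.mp hw'
    rw [e]
    apply Loose.pvBody
    simp only
    omega
  · apply rem_sameExcept hs (by omega)
    intro w hw'
    have e := List.mem_singleton.mp hw'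
    rw [e]
    simp only
    omega

/-- **1087E2H (ret15) … 108816H, GIF_OK** (dgif_lib.c:227-239): `test eax, eax ; je` not taken; the checked stores
`gif.Error = 0` (`gif + 96`) and `pv.gif89 = (Buf[4] == '9')` (`pv + 24928`): to the epilogue with `rbx = gif`. -/
theorem seg5_ok (Lay : Layout) (hLay : Lay.hi = 0x1000000) (μ : Microarch) (hμ : UserX.MicroOK μ) (u₀ : State)
    (hcode : HasCodeNat Lay u₀ Gif.L.DGifOpen.entry Gif.Code.code_DGifOpen.nat Gif.L.DGifOpen.size)
    (H : Heap) (rest : List Obj) (frames : List (Nat × FrameLayout)) (R : Rd) (Hn : Heap) (Fn : Forest) (gif pv : Nat)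
    (e : State) (ret : Word)
    (h_asan_store4_noabort : Asan.SmallCheck Lay μ ProgX.Base.WayInv (ProgX.Base.CodeOK u₀) [.rax, .rcx, .rdx] 4
      ProgX.Base.L.__asan_store4_noabort.entry)
    (h_asan_store1_noabort : Asan.SmallCheck Lay μ ProgX.Base.WayInv (ProgX.Base.CodeOK u₀) [.rax, .rdx] 1
      ProgX.Base.L.__asan_store1_noabort.entry)
    (v : State) (hat : seg5_AtRet15 H rest frames R Hn Fn gif pv u₀ e ret v) (hone : (v.reg .rax).toNat = 1) :
    ReachVia Lay μ ProgX.Base.WayInv v (DGifOpen.Exit H rest frames R u₀ e ret) := by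
  obtain ⟨hcore, c_r13, hrbx, hrbp, hregion, hinv, hok, hfgif, hfpv, hficm, hfsaved, hfpend, hbool, herr0⟩ := hat
  have he := hcore.entry
  v_entry he
  obtain ⟨hheap, hctx, hcursor0, hconsts0, hrdi, hrsi, herr⟩ := hcore.pre
  have w_rip := hcore.rip
  have c_rsp : v.reg .rsp = e.reg .rsp - 120 := hcore.rsp
  -- `eax` as a variable `z` (the branch fact of `test eax, eax` speaks of it)
  obtain ⟨z, c_rax⟩ : ∃ z, v.reg .rax = z := ⟨_, rfl⟩
  rw [c_rax] at hone
  -- gif and pv as word variables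
  obtain ⟨g, c_rbx⟩ : ∃ g, v.reg .rbx = g := ⟨_, rfl⟩
  rw [c_rbx] at hrbx
  obtain ⟨p, c_rbp⟩ : ∃ p, v.reg .rbp = p := ⟨_, rfl⟩
  rw [c_rbp] at hrbp
  have w_kept : RegsKept [.rsp] v v := RegsKept.refl _ _
  have w_eq : Mem.EqOn ProgX.Base.L.textLo ProgX.Base.L.textHi u₀.mem v.mem := ProgX.Base.conv_code_eqOn hcore.code
  have hdf := (show abiInv _ from hcore.abi).1
  have hmx := (show abiInv _ from hcore.abi).2
  have hsse := ProgX.Base.sseOK_of_abiInv hcore.abi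
  have k_r15 : v.mem.readLE (e.reg .rsp - 8) 8 = (e.reg .r15).toNat := hcore.slot_r15
  have k_r14 : v.mem.readLE (e.reg .rsp - 16) 8 = (e.reg .r14).toNat := hcore.slot_r14
  have k_r13 : v.mem.readLE (e.reg .rsp - 24) 8 = (e.reg .r13).toNat := hcore.slot_r13
  have k_r12 : v.mem.readLE (e.reg .rsp - 32) 8 = (e.reg .r12).toNat := hcore.slot_r12
  have k_rbp : v.mem.readLE (e.reg .rsp - 40) 8 = (e.reg .rbp).toNat := hcore.slot_rbp
  have k_rbx : v.mem.readLE (e.reg .rsp - 48) 8 = (e.reg .rbx).toNat := hcore.slot_rbx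
  have k_ra : UInt64.ofNat (v.mem.readLE (e.reg .rsp) 8) = ret := hcore.slot_ra
  have hsame : Mem.SameExcept
    [⟨(e.reg .rsp).toNat - 528, (e.reg .rsp).toNat⟩,
     shadowSpan ((e.reg .rsp).toNat - 120) ((e.reg .rsp).toNat - 56),
     ⟨0x800000, 0x1000020⟩,
     ⟨(e.reg .rdx).toNat, (e.reg .rdx).toNat + 4⟩,
     ⟨R.cur, R.cur + 8⟩] e.mem v.mem := hcore.same
  -- where the cursor, gif and pv are, as numbers
  have hcur := hctx.cursor_range hheap.inv.shadow
  have hbase : Hn.base = 0x800000 := hregion.1.trans hheap.base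
  have hgin := hok.owns.inside hinv.heap (o := (Fn.gif, 120)) List.mem_cons_self
  have hpin := hok.owns.inside hinv.heap (o := (Fn.pv, 24936)) (List.mem_cons_of_mem _ List.mem_cons_self)
  simp only at hgin hpin
  rw [hbase, hfgif] at hgin
  rw [hbase, hfpv] at hpin
  have hg1 := hgin.1
  have hg2 := hgin.2.2.2.2
  have hp1 := hpin.1
  have hp2 := hpin.2.2.2.2
  clear hgin hpin
  -- gif and pv are live under the body's frames: what the two check goals ask
  have hgl : LiveIn (Hn.liveObjs ++ rest) (DGifOpen.framesIn frames e) Fn.gif 120 :=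
    hok.gif_live.liveIn rest _ (Nat.le_refl _) (Nat.le_refl _)
  have hpl : LiveIn (Hn.liveObjs ++ rest) (DGifOpen.framesIn frames e) Fn.pv 24936 :=
    hok.pv_live.liveIn rest _ (Nat.le_refl _) (Nat.le_refl _)
  rw [hfgif] at hgl
  rw [hfpv] at hpl
  u_walk hcode [hμ.vendor] until [Gif.L.DGifOpen.at_108816] span [ProgX.Base.L.textLo, ProgX.Base.L.textHi] side (v_side)
  case check_1087ee =>
    -- dgif_lib.c:236 the store of `gif.Error`: 4 bytes inside gif
    have hun : ShadowUntouched v.mem s_1087ee.mem := by v_untouched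
    exact hgl.accSmall hinv.shadow hun _ 4 (by decide) (by u_omega) (by u_omega)
  case check_10880a =>
    -- dgif_lib.c:239 the store of `pv.gif89`: 1 byte inside pv
    have hun : ShadowUntouched v.mem s_10880a.mem := by v_untouched
    exact hpl.accSmall hinv.shadow hun _ 1 (by decide) (by u_omega) (by u_omega)
  · -- the arm GIF_ERROR is not taken: `eax = 1`
    exfalso
    rw [toNat_part32] at hbr_1087e4
    omega
  -- 0x108816: BEFORE THE EPILOGUE. The byte stored into `pv.gif89` as a variable
  obtain ⟨val, hval⟩ : ∃ val : Nat, s_10880f.mem =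
      (((v.mem.writeLE (e.reg .rsp - 128) 8 1083379).writeLE (g + 96) 4 0).writeLE (e.reg .rsp - 128) 8
        1083407).writeLE (p + 24928) 1 val := ⟨_, w_mem⟩
  clear w_mem w_r13
  -- the four stores since `v`: a check call's return address (stack), `gif.Error`, a return address again, `pv.gif89`
  obtain ⟨hinvA, hokA, hremA⟩ := store_stack hinv hok ⟨hcur.1, hcur.2.1⟩ (e.reg .rsp - 128) 8 1083379
    (by u_omega) (by u_omega)
  obtain ⟨hinvB, hokB, hremB⟩ := store_gif hinvA hokA ⟨hcur.1, hcur.2.1⟩ hbase (g + 96) 4 0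
    (Or.inr (Or.inr (by rw [hfgif]; u_omega)))
  obtain ⟨hinvC, hokC, hremC⟩ := store_stack hinvB hokB ⟨hcur.1, hcur.2.1⟩ (e.reg .rsp - 128) 8 1083407
    (by u_omega) (by u_omega)
  obtain ⟨hinvD, hokD, hremD⟩ := seg5_store_pv hinvC hokC ⟨hcur.1, hcur.2.1⟩ hbase (p + 24928) 1 val
    (Or.inr (by rw [hfpv]; u_omega))
  rw [← hval] at hinvD hokD hremD
  have hremF : rem R s_10880f.mem = rem R v.mem := ((hremD.trans hremC).trans hremB).trans hremA
  -- THE EXIT ASSERTION: `Core` at 0x108816 …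
  have hcore1 : DGifOpen.Core Gif.L.DGifOpen.at_108816 H rest frames R u₀ e ret s_10880f := {
    entry := hcore.entry
    pre := hcore.pre
    rip := w_rip
    rsp := w_rsp
    r12 := (w_kept.get .r12 rfl).trans hcore.r12
    slot_r15 := by
      rw [hval]
      u_frame k_r15
    slot_r14 := by
      rw [hval]
      u_frame k_r14
    slot_r13 := by
      rw [hval]
      u_frame k_r13
    slot_r12 := by
      rw [hval]
      u_frame k_r12
    slot_rbp := by
      rw [hval]
      u_frame k_rbp
    slot_rbx := by
      rw [hval]
      u_frame k_rbx
    slot_ra := by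
      rw [hval]
      u_frame k_ra
    rem := by
      rw [hremF]
      exact hcore.rem
    same := by
      rw [hval]
      u_same
    code := ProgX.Base.conv_code_in w_eq
    abi := by
      refine ProgX.Base.abiInv_of ?_ ?_
      · rw [w_flags]
        exact w_df_10880a
      · rw [w_mxcsr]
        exact hmx
  }
  -- … and the contract's post for the heap `Hn` and the forest `Fn`
  refine ReachVia.done ⟨Hn, ?_⟩
  exact {
    core := hcore1
    region := hregion
    inv := hinvD
    cursor := hokD.shape.cursor
    consts := hokD.shape.consts
    res := by
      right
      refine ⟨Fn, ?_, hokD, hficm, hfsaved, hfpend⟩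
      rw [w_kept.get .rbx rfl, c_rbx, hfgif]
      exact hrbx
  }

/-- **At 1088D3H (ret27), `free(pv)` has returned** on the way GIF_ERROR: `Core`; `r13 = Error`, `rbx = gif`; the present heap
`Hm` (at the place of the entry's) with its invariant, in which gif is still live; the cursor and the constants. -/
structure seg5_AtRet27 (H : Heap) (rest : List Obj) (frames : List (Nat × FrameLayout)) (R : Rd) (Hm : Heap) (gif : Nat)
    (u₀ e : State) (ret : Word) (v : State) : Prop where
  core : DGifOpen.Core Gif.L.DGifOpen.ret27 H rest frames R u₀ e ret v
  r13 : v.reg .r13 = e.reg .rdx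
  rbx : (v.reg .rbx).toNat = gif
  region : SameRegion H Hm
  inv : HeapInv Hm rest (DGifOpen.framesIn frames e) ((e.reg .rsp).toNat - 120) v.mem
  live : Hm.Live gif 120
  cursor : CursorOK R v.mem
  consts : Consts v.mem

/-- **1087E2H (ret15) … 1088D3H (ret27), GIF_ERROR** (dgif_lib.c:227-228): `test eax, eax ; je` taken; `free(pv)`: pv is live in
`Hn` (`GifOK.pv_live`), gif stays live in `Hn.release pv` (another base: `GifOK.gif_ne_pv`). -/
theorem seg5_err1 (Lay : Layout) (hLay : Lay.hi = 0x1000000) (μ : Microarch) (hμ : UserX.MicroOK μ) (u₀ : State)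
    (hcode : HasCodeNat Lay u₀ Gif.L.DGifOpen.entry Gif.Code.code_DGifOpen.nat Gif.L.DGifOpen.size)
    (H : Heap) (rest : List Obj) (frames : List (Nat × FrameLayout)) (R : Rd) (Hn : Heap) (Fn : Forest) (gif pv : Nat)
    (e : State) (ret : Word)
    (h_free : Calls Lay μ ProgX.Base.WayInv (ProgX.Base.conv u₀) ProgX.Base.L.free.entry
      (ProgX.Base.Spec.free.spec Hn rest (DGifOpen.framesIn frames e) 24936))
    (v : State) (hat : seg5_AtRet15 H rest frames R Hn Fn gif pv u₀ e ret v) (hzero : (v.reg .rax).toNat = 0) :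
    ReachVia Lay μ ProgX.Base.WayInv v (fun w => ∃ Hm, seg5_AtRet27 H rest frames R Hm gif u₀ e ret w) := by
  obtain ⟨hcore, c_r13, hrbx, hrbp, hregion, hinv, hok, hfgif, hfpv, hficm, hfsaved, hfpend, hbool, herr0⟩ := hat
  have he := hcore.entry
  v_entry he
  obtain ⟨hheap, hctx, hcursor0, hconsts0, hrdi, hrsi, herr⟩ := hcore.pre
  have w_rip := hcore.rip
  have c_rsp : v.reg .rsp = e.reg .rsp - 120 := hcore.rsp
  obtain ⟨z, c_rax⟩ : ∃ z, v.reg .rax = z := ⟨_, rfl⟩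
  rw [c_rax] at hzero
  obtain ⟨p, c_rbp⟩ : ∃ p, v.reg .rbp = p := ⟨_, rfl⟩
  rw [c_rbp] at hrbp
  have w_kept : RegsKept [.rsp] v v := RegsKept.refl _ _
  have w_eq : Mem.EqOn ProgX.Base.L.textLo ProgX.Base.L.textHi u₀.mem v.mem := ProgX.Base.conv_code_eqOn hcore.code
  have hdf := (show abiInv _ from hcore.abi).1
  have hmx := (show abiInv _ from hcore.abi).2
  have hsse := ProgX.Base.sseOK_of_abiInv hcore.abi
  have k_r15 : v.mem.readLE (e.reg .rsp - 8) 8 = (e.reg .r15).toNat := hcore.slot_r15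
  have k_r14 : v.mem.readLE (e.reg .rsp - 16) 8 = (e.reg .r14).toNat := hcore.slot_r14
  have k_r13 : v.mem.readLE (e.reg .rsp - 24) 8 = (e.reg .r13).toNat := hcore.slot_r13
  have k_r12 : v.mem.readLE (e.reg .rsp - 32) 8 = (e.reg .r12).toNat := hcore.slot_r12
  have k_rbp : v.mem.readLE (e.reg .rsp - 40) 8 = (e.reg .rbp).toNat := hcore.slot_rbp
  have k_rbx : v.mem.readLE (e.reg .rsp - 48) 8 = (e.reg .rbx).toNat := hcore.slot_rbx
  have k_ra : UInt64.ofNat (v.mem.readLE (e.reg .rsp) 8) = ret := hcore.slot_ra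
  have hsame : Mem.SameExcept
    [⟨(e.reg .rsp).toNat - 528, (e.reg .rsp).toNat⟩,
     shadowSpan ((e.reg .rsp).toNat - 120) ((e.reg .rsp).toNat - 56),
     ⟨0x800000, 0x1000020⟩,
     ⟨(e.reg .rdx).toNat, (e.reg .rdx).toNat + 4⟩,
     ⟨R.cur, R.cur + 8⟩] e.mem v.mem := hcore.same
  -- where the cursor and pv are, as numbers
  have hcur := hctx.cursor_range hheap.inv.shadow
  have hbase : Hn.base = 0x800000 := hregion.1.trans hheap.base
  have hlimit : Hn.limit = 0xC00000 := hregion.2.trans hheap.limit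
  have hpin := hok.owns.inside hinv.heap (o := (Fn.pv, 24936)) (List.mem_cons_of_mem _ List.mem_cons_self)
  simp only at hpin
  rw [hbase, hfpv] at hpin
  have hp1 := hpin.1
  have hp2 := hpin.2.2.2.2
  clear hpin
  -- pv is live; gif stays live when pv is freed
  have hplive : Hn.Live pv 24936 := by
    rw [← hfpv]
    exact hok.pv_live
  have hglive : (Hn.release pv).Live gif 120 := by
    rw [← hfgif, ← hfpv]
    exact hok.gif_live.release_ne hok.gif_ne_pv
  u_walk hcode [hμ.vendor] until [Gif.L.DGifOpen.ret27] span [ProgX.Base.L.textLo, ProgX.Base.L.textHi] side (v_side)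
  case call_inv =>
    v_inv
  case pre_1088ce =>
    -- 0x1088ce (dgif_lib.c:228) `free(Private)`: the heap's invariant over the pushed return address; pv is live
    have e_rsp : (s_1088ce.reg .rsp).toNat + 8 = (e.reg .rsp).toNat - 120 := by
      rw [w_rsp]
      u_omega
    refine ⟨⟨?_, hbase, hlimit, hheap.text, hheap.offText⟩, Or.inr ?_⟩
    · rw [e_rsp, w_mem]
      exact hinv.writeLE_out _ _ _ (by u_omega) (by rw [hbase]; left; u_omega) (by left; u_omega)
    · rw [w_rdi, hrbp]
      exact hplive
  · -- 0x1088d3 (ret27): `free(Private)` HAS RETURNED: the heap is `Hn.release pv`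
    have hne1 : (s_1088ce.reg .rdi).toNat ≠ 0 := by
      rw [w_rdi_1088ce, hrbp]
      omega
    have hinv1 := w_post.2 hne1
    rw [w_rdi_1088ce, hrbp] at hinv1
    clear w_post
    have e8 : (s_1088ce.reg .rsp).toNat + 8 = (e.reg .rsp).toNat - 120 := by
      rw [w_rsp_1088ce]
      u_omega
    rw [e8] at hinv1
    v_after_call w_rsp_1088ce w_mem_1088ce
    simp only [shadowSpan, w_rdi_1088ce, hrbp] at w_same
    -- THE SLOTS AND THE RETURN ADDRESS, over the pushed return address and through `free`'s footprint
    have hp15 : s_1088ce.mem.readLE (e.reg .rsp - 8) 8 = (e.reg .r15).toNat := by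
      rw [w_mem_1088ce]
      u_frame k_r15
    rw [w_mem_1088ce] at hp15
    have hs15 : s_1088cer.mem.readLE (e.reg .rsp - 8) 8 = (e.reg .r15).toNat := by u_frame hp15
    have hp14 : s_1088ce.mem.readLE (e.reg .rsp - 16) 8 = (e.reg .r14).toNat := by
      rw [w_mem_1088ce]
      u_frame k_r14
    rw [w_mem_1088ce] at hp14
    have hs14 : s_1088cer.mem.readLE (e.reg .rsp - 16) 8 = (e.reg .r14).toNat := by u_frame hp14
    have hp13 : s_1088ce.mem.readLE (e.reg .rsp - 24) 8 = (e.reg .r13).toNat := by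
      rw [w_mem_1088ce]
      u_frame k_r13
    rw [w_mem_1088ce] at hp13
    have hs13 : s_1088cer.mem.readLE (e.reg .rsp - 24) 8 = (e.reg .r13).toNat := by u_frame hp13
    have hp12 : s_1088ce.mem.readLE (e.reg .rsp - 32) 8 = (e.reg .r12).toNat := by
      rw [w_mem_1088ce]
      u_frame k_r12
    rw [w_mem_1088ce] at hp12
    have hs12 : s_1088cer.mem.readLE (e.reg .rsp - 32) 8 = (e.reg .r12).toNat := by u_frame hp12
    have hpbp : s_1088ce.mem.readLE (e.reg .rsp - 40) 8 = (e.reg .rbp).toNat := by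
      rw [w_mem_1088ce]
      u_frame k_rbp
    rw [w_mem_1088ce] at hpbp
    have hsbp : s_1088cer.mem.readLE (e.reg .rsp - 40) 8 = (e.reg .rbp).toNat := by u_frame hpbp
    have hpbx : s_1088ce.mem.readLE (e.reg .rsp - 48) 8 = (e.reg .rbx).toNat := by
      rw [w_mem_1088ce]
      u_frame k_rbx
    rw [w_mem_1088ce] at hpbx
    have hsbx : s_1088cer.mem.readLE (e.reg .rsp - 48) 8 = (e.reg .rbx).toNat := by u_frame hpbx
    have hpra : UInt64.ofNat (s_1088ce.mem.readLE (e.reg .rsp) 8) = ret := by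
      rw [w_mem_1088ce]
      u_frame k_ra
    rw [w_mem_1088ce] at hpra
    have hsra : UInt64.ofNat (s_1088cer.mem.readLE (e.reg .rsp) 8) = ret := by u_frame hpra
    -- what was written since `v`: stack below the body's frame, the heap's region and its shadow
    have hs : Mem.SameExcept [⟨(e.reg .rsp).toNat - 528, (e.reg .rsp).toNat - 120⟩, ⟨0x800000, 0x1000020⟩]
        v.mem s_1088cer.mem := by u_same
    -- the footprint since the entry
    have hsame1 : Mem.SameExcept
      [⟨(e.reg .rsp).toNat - 528, (e.reg .rsp).toNat⟩,
       shadowSpan ((e.reg .rsp).toNat - 120) ((e.reg .rsp).toNat - 56),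
       ⟨0x800000, 0x1000020⟩,
       ⟨(e.reg .rdx).toNat, (e.reg .rdx).toNat + 4⟩,
       ⟨R.cur, R.cur + 8⟩] e.mem s_1088cer.mem := by u_same
    -- the cursor, the constants and the reader's measure: nothing written meets them
    have hoffc : ∀ w, w ∈ [(⟨(e.reg .rsp).toNat - 528, (e.reg .rsp).toNat - 120⟩ : Span), ⟨0x800000, 0x1000020⟩] →
        w.hi ≤ R.cur ∨ R.cur + 16 ≤ w.lo := by
      intro w hw
      rcases List.mem_cons.mp hw with rfl | hw
      · simp only
        omega
      · have e := List.mem_singleton.mp hw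
        rw [e]
        simp only
        omega
    have hoffk : ∀ w, w ∈ [(⟨(e.reg .rsp).toNat - 528, (e.reg .rsp).toNat - 120⟩ : Span), ⟨0x800000, 0x1000020⟩] →
        w.hi ≤ 0x141300 ∨ 0x14139a ≤ w.lo := by
      intro w hw
      rcases List.mem_cons.mp hw with rfl | hw
      · simp only
        omega
      · have e := List.mem_singleton.mp hw
        rw [e]
        simp only
        omega
    have hrem1 : rem R s_1088cer.mem = rem R v.mem := rem_sameExcept hs (by omega) hoffc
    refine ReachVia.done ⟨Hn.release pv, ?_⟩
    exact {
      core := {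
        entry := hcore.entry
        pre := hcore.pre
        rip := w_rip
        rsp := w_rsp
        r12 := (w_kept.get .r12 rfl).trans hcore.r12
        slot_r15 := hs15
        slot_r14 := hs14
        slot_r13 := hs13
        slot_r12 := hs12
        slot_rbp := hsbp
        slot_rbx := hsbx
        slot_ra := hsra
        rem := by
          rw [hrem1]
          exact hcore.rem
        same := hsame1
        code := w_code
        abi := w_inv
      }
      r13 := (w_kept.get .r13 rfl).trans c_r13
      rbx := by
        rw [w_kept.get .rbx rfl]
        exact hrbx
      region := hregion.trans (SameRegion.release Hn pv)
      inv := hinv1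
      live := hglive
      cursor := hok.shape.cursor.sameExcept hs (by omega) hoffc
      consts := hok.shape.consts.sameExcept hs hoffk
    }
  · -- the arm GIF_OK is not taken: `eax = 0`
    exfalso
    rw [toNat_part32] at hbr_1087e4
    omega

/-- **At 1088DBH (ret28), `free(gif)` has returned** on the way GIF_ERROR: `Core`; `r13 = Error`; the present heap `Hm` (at the
place of the entry's) with its invariant; the cursor and the constants. -/
structure seg5_AtRet28 (H : Heap) (rest : List Obj) (frames : List (Nat × FrameLayout)) (R : Rd) (Hm : Heap)
    (u₀ e : State) (ret : Word) (v : State) : Prop where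
  core : DGifOpen.Core Gif.L.DGifOpen.ret28 H rest frames R u₀ e ret v
  r13 : v.reg .r13 = e.reg .rdx
  region : SameRegion H Hm
  inv : HeapInv Hm rest (DGifOpen.framesIn frames e) ((e.reg .rsp).toNat - 120) v.mem
  cursor : CursorOK R v.mem
  consts : Consts v.mem

/-- **1088D3H (ret27) … 1088DBH (ret28)** (dgif_lib.c:229): `free(GifFile)`: gif is live in the present heap. -/
theorem seg5_err2 (Lay : Layout) (hLay : Lay.hi = 0x1000000) (μ : Microarch) (hμ : UserX.MicroOK μ) (u₀ : State)
    (hcode : HasCodeNat Lay u₀ Gif.L.DGifOpen.entry Gif.Code.code_DGifOpen.nat Gif.L.DGifOpen.size)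
    (H : Heap) (rest : List Obj) (frames : List (Nat × FrameLayout)) (R : Rd) (Hm : Heap) (gif : Nat)
    (e : State) (ret : Word)
    (h_free : Calls Lay μ ProgX.Base.WayInv (ProgX.Base.conv u₀) ProgX.Base.L.free.entry
      (ProgX.Base.Spec.free.spec Hm rest (DGifOpen.framesIn frames e) 120))
    (v : State) (hat : seg5_AtRet27 H rest frames R Hm gif u₀ e ret v) :
    ReachVia Lay μ ProgX.Base.WayInv v (fun w => ∃ Hk, seg5_AtRet28 H rest frames R Hk u₀ e ret w) := by
  obtain ⟨hcore, c_r13, hrbx, hregion, hinv, hglive, hcursor, hconsts⟩ := hat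
  have he := hcore.entry
  v_entry he
  obtain ⟨hheap, hctx, hcursor0, hconsts0, hrdi, hrsi, herr⟩ := hcore.pre
  have w_rip := hcore.rip
  have c_rsp : v.reg .rsp = e.reg .rsp - 120 := hcore.rsp
  obtain ⟨g, c_rbx⟩ : ∃ g, v.reg .rbx = g := ⟨_, rfl⟩
  rw [c_rbx] at hrbx
  have w_kept : RegsKept [.rsp] v v := RegsKept.refl _ _
  have w_eq : Mem.EqOn ProgX.Base.L.textLo ProgX.Base.L.textHi u₀.mem v.mem := ProgX.Base.conv_code_eqOn hcore.code
  have hdf := (show abiInv _ from hcore.abi).1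
  have hmx := (show abiInv _ from hcore.abi).2
  have hsse := ProgX.Base.sseOK_of_abiInv hcore.abi
  have k_r15 : v.mem.readLE (e.reg .rsp - 8) 8 = (e.reg .r15).toNat := hcore.slot_r15
  have k_r14 : v.mem.readLE (e.reg .rsp - 16) 8 = (e.reg .r14).toNat := hcore.slot_r14
  have k_r13 : v.mem.readLE (e.reg .rsp - 24) 8 = (e.reg .r13).toNat := hcore.slot_r13
  have k_r12 : v.mem.readLE (e.reg .rsp - 32) 8 = (e.reg .r12).toNat := hcore.slot_r12
  have k_rbp : v.mem.readLE (e.reg .rsp - 40) 8 = (e.reg .rbp).toNat := hcore.slot_rbp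
  have k_rbx : v.mem.readLE (e.reg .rsp - 48) 8 = (e.reg .rbx).toNat := hcore.slot_rbx
  have k_ra : UInt64.ofNat (v.mem.readLE (e.reg .rsp) 8) = ret := hcore.slot_ra
  have hsame : Mem.SameExcept
    [⟨(e.reg .rsp).toNat - 528, (e.reg .rsp).toNat⟩,
     shadowSpan ((e.reg .rsp).toNat - 120) ((e.reg .rsp).toNat - 56),
     ⟨0x800000, 0x1000020⟩,
     ⟨(e.reg .rdx).toNat, (e.reg .rdx).toNat + 4⟩,
     ⟨R.cur, R.cur + 8⟩] e.mem v.mem := hcore.same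
  -- where the cursor and gif are, as numbers
  have hcur := hctx.cursor_range hheap.inv.shadow
  have hbase : Hm.base = 0x800000 := hregion.1.trans hheap.base
  have hlimit : Hm.limit = 0xC00000 := hregion.2.trans hheap.limit
  obtain ⟨cap, hcap⟩ := hglive
  have hrg := hinv.heap.obj_range hcap
  have hin := hinv.heap.obj_inside hcap
  have hsc := hinv.heap.size_le_cap hcap
  have hroom := hinv.heap.room
  have hglive : Hm.Live gif 120 := ⟨cap, hcap⟩
  rw [hbase] at hrg hroom
  rw [hlimit] at hroom
  simp only at hrg hin hsc
  u_walk hcode [hμ.vendor] until [Gif.L.DGifOpen.ret28] span [ProgX.Base.L.textLo, ProgX.Base.L.textHi] side (v_side)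
  case call_inv =>
    v_inv
  case pre_1088d6 =>
    -- 0x1088d6 (dgif_lib.c:229) `free(GifFile)`: the heap's invariant over the pushed return address; gif is live
    have e_rsp : (s_1088d6.reg .rsp).toNat + 8 = (e.reg .rsp).toNat - 120 := by
      rw [w_rsp]
      u_omega
    refine ⟨⟨?_, hbase, hlimit, hheap.text, hheap.offText⟩, Or.inr ?_⟩
    · rw [e_rsp, w_mem]
      exact hinv.writeLE_out _ _ _ (by u_omega) (by rw [hbase]; left; u_omega) (by left; u_omega)
    · rw [w_rdi, hrbx]
      exact hglive
  -- 0x1088db (ret28): `free(GifFile)` HAS RETURNED: the heap is `Hm.release gif`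
  have hne1 : (s_1088d6.reg .rdi).toNat ≠ 0 := by
    rw [w_rdi_1088d6, hrbx]
    omega
  have hinv1 := w_post.2 hne1
  rw [w_rdi_1088d6, hrbx] at hinv1
  clear w_post
  have e8 : (s_1088d6.reg .rsp).toNat + 8 = (e.reg .rsp).toNat - 120 := by
    rw [w_rsp_1088d6]
    u_omega
  rw [e8] at hinv1
  v_after_call w_rsp_1088d6 w_mem_1088d6
  simp only [shadowSpan, w_rdi_1088d6, hrbx] at w_same
  -- THE SLOTS AND THE RETURN ADDRESS, over the pushed return address and through `free`'s footprint
  have hp15 : s_1088d6.mem.readLE (e.reg .rsp - 8) 8 = (e.reg .r15).toNat := by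
    rw [w_mem_1088d6]
    u_frame k_r15
  rw [w_mem_1088d6] at hp15
  have hs15 : s_1088d6r.mem.readLE (e.reg .rsp - 8) 8 = (e.reg .r15).toNat := by u_frame hp15
  have hp14 : s_1088d6.mem.readLE (e.reg .rsp - 16) 8 = (e.reg .r14).toNat := by
    rw [w_mem_1088d6]
    u_frame k_r14
  rw [w_mem_1088d6] at hp14
  have hs14 : s_1088d6r.mem.readLE (e.reg .rsp - 16) 8 = (e.reg .r14).toNat := by u_frame hp14
  have hp13 : s_1088d6.mem.readLE (e.reg .rsp - 24) 8 = (e.reg .r13).toNat := by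
    rw [w_mem_1088d6]
    u_frame k_r13
  rw [w_mem_1088d6] at hp13
  have hs13 : s_1088d6r.mem.readLE (e.reg .rsp - 24) 8 = (e.reg .r13).toNat := by u_frame hp13
  have hp12 : s_1088d6.mem.readLE (e.reg .rsp - 32) 8 = (e.reg .r12).toNat := by
    rw [w_mem_1088d6]
    u_frame k_r12
  rw [w_mem_1088d6] at hp12
  have hs12 : s_1088d6r.mem.readLE (e.reg .rsp - 32) 8 = (e.reg .r12).toNat := by u_frame hp12
  have hpbp : s_1088d6.mem.readLE (e.reg .rsp - 40) 8 = (e.reg .rbp).toNat := by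
    rw [w_mem_1088d6]
    u_frame k_rbp
  rw [w_mem_1088d6] at hpbp
  have hsbp : s_1088d6r.mem.readLE (e.reg .rsp - 40) 8 = (e.reg .rbp).toNat := by u_frame hpbp
  have hpbx : s_1088d6.mem.readLE (e.reg .rsp - 48) 8 = (e.reg .rbx).toNat := by
    rw [w_mem_1088d6]
    u_frame k_rbx
  rw [w_mem_1088d6] at hpbx
  have hsbx : s_1088d6r.mem.readLE (e.reg .rsp - 48) 8 = (e.reg .rbx).toNat := by u_frame hpbx
  have hpra : UInt64.ofNat (s_1088d6.mem.readLE (e.reg .rsp) 8) = ret := by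
    rw [w_mem_1088d6]
    u_frame k_ra
  rw [w_mem_1088d6] at hpra
  have hsra : UInt64.ofNat (s_1088d6r.mem.readLE (e.reg .rsp) 8) = ret := by u_frame hpra
  -- what was written since `v`: stack below the body's frame, the heap's region and its shadow
  have hs : Mem.SameExcept [⟨(e.reg .rsp).toNat - 528, (e.reg .rsp).toNat - 120⟩, ⟨0x800000, 0x1000020⟩]
      v.mem s_1088d6r.mem := by u_same
  -- the footprint since the entry
  have hsame1 : Mem.SameExcept
    [⟨(e.reg .rsp).toNat - 528, (e.reg .rsp).toNat⟩,
     shadowSpan ((e.reg .rsp).toNat - 120) ((e.reg .rsp).toNat - 56),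
     ⟨0x800000, 0x1000020⟩,
     ⟨(e.reg .rdx).toNat, (e.reg .rdx).toNat + 4⟩,
     ⟨R.cur, R.cur + 8⟩] e.mem s_1088d6r.mem := by u_same
  -- the cursor, the constants and the reader's measure: nothing written meets them
  have hoffc : ∀ w, w ∈ [(⟨(e.reg .rsp).toNat - 528, (e.reg .rsp).toNat - 120⟩ : Span), ⟨0x800000, 0x1000020⟩] →
      w.hi ≤ R.cur ∨ R.cur + 16 ≤ w.lo := by
    intro w hw
    rcases List.mem_cons.mp hw with rfl | hw
    · simp only
      omega
    · have e := List.mem_singleton.mp hw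
      rw [e]
      simp only
      omega
  have hoffk : ∀ w, w ∈ [(⟨(e.reg .rsp).toNat - 528, (e.reg .rsp).toNat - 120⟩ : Span), ⟨0x800000, 0x1000020⟩] →
      w.hi ≤ 0x141300 ∨ 0x14139a ≤ w.lo := by
    intro w hw
    rcases List.mem_cons.mp hw with rfl | hw
    · simp only
      omega
    · have e := List.mem_singleton.mp hw
      rw [e]
      simp only
      omega
  have hrem1 : rem R s_1088d6r.mem = rem R v.mem := rem_sameExcept hs (by omega) hoffc
  refine ReachVia.done ⟨Hm.release gif, ?_⟩
  exact {
    core := {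
      entry := hcore.entry
      pre := hcore.pre
      rip := w_rip
      rsp := w_rsp
      r12 := (w_kept.get .r12 rfl).trans hcore.r12
      slot_r15 := hs15
      slot_r14 := hs14
      slot_r13 := hs13
      slot_r12 := hs12
      slot_rbp := hsbp
      slot_rbx := hsbx
      slot_ra := hsra
      rem := by
        rw [hrem1]
        exact hcore.rem
      same := hsame1
      code := w_code
      abi := w_inv
    }
    r13 := (w_kept.get .r13 rfl).trans c_r13
    region := hregion.trans (SameRegion.release Hm gif)
    inv := hinv1
    cursor := hcursor.sameExcept hs (by omega) hoffc
    consts := hconsts.sameExcept hs hoffk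
  }

/-- **`*Error` lies at or above the caller's stack pointer + 8** (a stack object of a CALLER's frame): the store `*Error = code`
meets neither the function's own stack nor the return address. -/
theorem seg5_err_above {H : Heap} {rest : List Obj} {frames : List (Nat × FrameLayout)} {R : Rd} {p : Nat} {e : State}
    (h : ErrPtr H rest frames R p) (hp : p ≠ 0) (hheap : HeapPre H rest frames e) :
    (e.reg .rsp).toNat + 8 ≤ p ∧ p + 4 ≤ 0x800000 ∧ (p + 4 ≤ R.cur ∨ R.cur + 16 ≤ p) := by
  rcases h with h0 | ⟨hl, hlo, hhi, hoffc⟩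
  · exact absurd h0 hp
  · have hw := hl.where_ hheap.inv.shadow hheap.offText_all (by decide)
    refine ⟨?_, hhi, hoffc⟩
    omega

/-- **1088DBH (ret28) … 108816H** (dgif_lib.c:230-233): `if (Error != NULL) *Error = D_GIF_ERR_NO_SCRN_DSCR` (104; the checked
store into the caller's `int`: `DGifOpen.errLive`), `ebx = 0`: to the epilogue with NULL. -/
theorem seg5_err3 (Lay : Layout) (hLay : Lay.hi = 0x1000000) (μ : Microarch) (hμ : UserX.MicroOK μ) (u₀ : State)
    (hcode : HasCodeNat Lay u₀ Gif.L.DGifOpen.entry Gif.Code.code_DGifOpen.nat Gif.L.DGifOpen.size)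
    (H : Heap) (rest : List Obj) (frames : List (Nat × FrameLayout)) (R : Rd) (Hm : Heap)
    (e : State) (ret : Word)
    (h_asan_store4_noabort : Asan.SmallCheck Lay μ ProgX.Base.WayInv (ProgX.Base.CodeOK u₀) [.rax, .rcx, .rdx] 4
      ProgX.Base.L.__asan_store4_noabort.entry)
    (v : State) (hat : seg5_AtRet28 H rest frames R Hm u₀ e ret v) :
    ReachVia Lay μ ProgX.Base.WayInv v (DGifOpen.Exit H rest frames R u₀ e ret) := by
  obtain ⟨hcore, c_r13, hregion, hinv, hcursor, hconsts⟩ := hat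
  have he := hcore.entry
  v_entry he
  obtain ⟨hheap, hctx, hcursor0, hconsts0, hrdi, hrsi, herr⟩ := hcore.pre
  have w_rip := hcore.rip
  have c_rsp : v.reg .rsp = e.reg .rsp - 120 := hcore.rsp
  have w_kept : RegsKept [.rsp] v v := RegsKept.refl _ _
  have w_eq : Mem.EqOn ProgX.Base.L.textLo ProgX.Base.L.textHi u₀.mem v.mem := ProgX.Base.conv_code_eqOn hcore.code
  have hdf := (show abiInv _ from hcore.abi).1
  have hmx := (show abiInv _ from hcore.abi).2
  have hsse := ProgX.Base.sseOK_of_abiInv hcore.abi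
  have k_r15 : v.mem.readLE (e.reg .rsp - 8) 8 = (e.reg .r15).toNat := hcore.slot_r15
  have k_r14 : v.mem.readLE (e.reg .rsp - 16) 8 = (e.reg .r14).toNat := hcore.slot_r14
  have k_r13 : v.mem.readLE (e.reg .rsp - 24) 8 = (e.reg .r13).toNat := hcore.slot_r13
  have k_r12 : v.mem.readLE (e.reg .rsp - 32) 8 = (e.reg .r12).toNat := hcore.slot_r12
  have k_rbp : v.mem.readLE (e.reg .rsp - 40) 8 = (e.reg .rbp).toNat := hcore.slot_rbp
  have k_rbx : v.mem.readLE (e.reg .rsp - 48) 8 = (e.reg .rbx).toNat := hcore.slot_rbx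
  have k_ra : UInt64.ofNat (v.mem.readLE (e.reg .rsp) 8) = ret := hcore.slot_ra
  have hsame : Mem.SameExcept
    [⟨(e.reg .rsp).toNat - 528, (e.reg .rsp).toNat⟩,
     shadowSpan ((e.reg .rsp).toNat - 120) ((e.reg .rsp).toNat - 56),
     ⟨0x800000, 0x1000020⟩,
     ⟨(e.reg .rdx).toNat, (e.reg .rdx).toNat + 4⟩,
     ⟨R.cur, R.cur + 8⟩] e.mem v.mem := hcore.same
  have hcur := hctx.cursor_range hheap.inv.shadow
  have hbase : Hm.base = 0x800000 := hregion.1.trans hheap.base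
  u_walk hcode [hμ.vendor] until [Gif.L.DGifOpen.at_108816] span [ProgX.Base.L.textLo, ProgX.Base.L.textHi] side (v_side)
  case check_1088e3 =>
    -- dgif_lib.c:231 the store of `*Error`: 4 bytes of a stack object of a caller's frame, live under every heap
    have hun : ShadowUntouched v.mem s_1088e3.mem := by v_untouched
    have hel := DGifOpen.errLive herr hbr_1088de hheap.inv Hm ((e.reg .rsp).toNat - 120, Gif.Frames.DGifOpen)
    exact hel.accSmall hinv.shadow hun _ 4 (by decide) (by u_omega) (by u_omega)
  case side_code =>
    -- `*Error` is a stack address: above the text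
    have hab := seg5_err_above herr hbr_1088de hheap
    omega
  · -- 0x108816 FROM 0x1088de, `Error == NULL`: nothing stored, `ebx = 0`
    refine ReachVia.done ⟨Hm, ?_⟩
    exact {
      core := {
        entry := hcore.entry
        pre := hcore.pre
        rip := w_rip
        rsp := w_rsp
        r12 := (w_kept.get .r12 rfl).trans hcore.r12
        slot_r15 := by
          rw [w_mem]
          exact k_r15
        slot_r14 := by
          rw [w_mem]
          exact k_r14
        slot_r13 := by
          rw [w_mem]
          exact k_r13
        slot_r12 := by
          rw [w_mem]
          exact k_r12
        slot_rbp := by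
          rw [w_mem]
          exact k_rbp
        slot_rbx := by
          rw [w_mem]
          exact k_rbx
        slot_ra := by
          rw [w_mem]
          exact k_ra
        rem := by
          rw [w_mem]
          exact hcore.rem
        same := by
          rw [w_mem]
          exact hsame
        code := ProgX.Base.conv_code_in w_eq
        abi := by
          refine ProgX.Base.abiInv_of ?_ ?_
          · rw [w_flags]
            simp only [X86.User.df_setStatus]
            exact hdf
          · rw [w_mxcsr]
            exact hmx
      }
      region := hregion
      inv := by
        rw [w_mem]
        exact hinv
      cursor := by
        rw [w_mem]
        exact hcursor
      consts := by
        rw [w_mem]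
        exact hconsts
      res := by
        left
        rw [w_rbx]
        decide
    }
  · -- 0x108816 FROM 0x1088e8, `*Error = 104` stored, `ebx = 0`
    have hab := seg5_err_above herr hbr_1088de hheap
    -- the two stores since `v`: the check call's return address (stack), then `*Error` (a caller's stack object)
    have hinvA := hinv.writeLE_out (e.reg .rsp - 128) 8 1083624 (by u_omega) (Or.inl (by rw [hbase]; u_omega))
      (Or.inl (by u_omega))
    have hinvB := hinvA.writeLE_out (e.reg .rdx) 4 104 (by omega) (Or.inl (by rw [hbase]; omega)) (Or.inl (by omega))
    rw [← w_mem] at hinvB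
    have hs : Mem.SameExcept [⟨(e.reg .rsp).toNat - 528, (e.reg .rsp).toNat - 120⟩,
        ⟨(e.reg .rdx).toNat, (e.reg .rdx).toNat + 4⟩] v.mem s_1088f5.mem := by
      rw [w_mem]
      u_same
    have hoffc : ∀ w, w ∈ [(⟨(e.reg .rsp).toNat - 528, (e.reg .rsp).toNat - 120⟩ : Span),
        ⟨(e.reg .rdx).toNat, (e.reg .rdx).toNat + 4⟩] → w.hi ≤ R.cur ∨ R.cur + 16 ≤ w.lo := by
      intro w hw
      rcases List.mem_cons.mp hw with rfl | hw
      · simp only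
        omega
      · have e := List.mem_singleton.mp hw
        rw [e]
        simp only
        omega
    have hoffk : ∀ w, w ∈ [(⟨(e.reg .rsp).toNat - 528, (e.reg .rsp).toNat - 120⟩ : Span),
        ⟨(e.reg .rdx).toNat, (e.reg .rdx).toNat + 4⟩] → w.hi ≤ 0x141300 ∨ 0x14139a ≤ w.lo := by
      intro w hw
      rcases List.mem_cons.mp hw with rfl | hw
      · simp only
        omega
      · have e := List.mem_singleton.mp hw
        rw [e]
        simp only
        omega
    have hrem1 : rem R s_1088f5.mem = rem R v.mem := rem_sameExcept hs (by omega) hoffc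
    refine ReachVia.done ⟨Hm, ?_⟩
    exact {
      core := {
        entry := hcore.entry
        pre := hcore.pre
        rip := w_rip
        rsp := w_rsp
        r12 := (w_kept.get .r12 rfl).trans hcore.r12
        slot_r15 := by
          rw [w_mem]
          u_frame k_r15
        slot_r14 := by
          rw [w_mem]
          u_frame k_r14
        slot_r13 := by
          rw [w_mem]
          u_frame k_r13
        slot_r12 := by
          rw [w_mem]
          u_frame k_r12
        slot_rbp := by
          rw [w_mem]
          u_frame k_rbp
        slot_rbx := by
          rw [w_mem]
          u_frame k_rbx
        slot_ra := by
          rw [w_mem]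
          u_frame k_ra
        rem := by
          rw [hrem1]
          exact hcore.rem
        same := by
          rw [w_mem]
          u_same
        code := ProgX.Base.conv_code_in w_eq
        abi := by
          refine ProgX.Base.abiInv_of ?_ ?_
          · rw [w_flags]
            exact w_df_1088e3
          · rw [w_mxcsr]
            exact hmx
      }
      region := hregion
      inv := hinvB
      cursor := hcursor.sameExcept hs (by omega) hoffc
      consts := hconsts.sameExcept hs hoffk
      res := by
        left
        rw [w_rbx]
        decide
    }

end Gif.Spec.DGifOpen_5
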